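-- pv_equiv track=rewrite | github.com/chris17453/digital_amber | scripts/build_audio_kokoro_proper.py | detect_dialogue_and_speaker
-- ===== SOURCE A (Python) =====
-- from typing import List, Tuple
--
-- def detect_emotion_from_text(text: str, speaker: str) -> str:
--     """Detect emotion from text context."""
--     text_lower = text.lower()
--
--     if any(word in text_lower for word in ['!', 'amazing', 'incredible', 'breakthrough']):
--         return 'excited'
--     elif any(word in text_lower for word in ['worried', 'concern', 'afraid', 'anxious']):
--         return 'concerned'
--     elif any(word in text_lower for word in ['frustrated', 'damn', 'hell', 'annoying']):
--         return 'frustrated'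
--     elif any(word in text_lower for word in ['wonder', 'think', 'perhaps', 'maybe']):
--         return 'contemplative'
--     elif any(word in text_lower for word in ['sad', 'lost', 'defeat', 'fail']):
--         return 'defeated'
--     else:
--         return 'neutral'
--
-- def detect_dialogue_and_speaker(text: str) -> List[Tuple[str, str, str]]:
--     """Parse text to identify dialogue, speakers, and emotions."""
--     segments = []
--     paragraphs = text.split('\n\n')
--
--     for para in paragraphs:
--         para = para.strip()
--         if not para:
--             continue
--
--         speaker = identify_speaker_from_context(para)
--         emotion = detect_emotion_from_text(para, speaker)
--         segments.append((speaker, para, emotion))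
--
--     return segments
--
-- def identify_speaker_from_context(text: str) -> str:
--     """Identify speaker from context clues."""
--     text_lower = text.lower()
--
--     if 'sarah martinez' in text_lower or 'dr. martinez' in text_lower:
--         return 'dr_sarah_martinez'
--     elif 'david chen' in text_lower and '"' in text:
--         return 'david_chen'
--     elif 'raj patel' in text_lower or 'dr. patel' in text_lower:
--         return 'dr_raj_patel'
--     elif 'artemis' in text_lower and '"' in text:
--         return 'artemis_ai'
--     elif 'marcus rivera' in text_lower or 'marcus said' in text_lower:
--         return 'marcus_rivera'
--     elif 'sarah kim' in text_lower:
--         return 'sarah_kim'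
--     elif 'jennifer wu' in text_lower or 'jennifer said' in text_lower:
--         return 'jennifer_wu'
--     else:
--         return 'narrator'
-- ===== SOURCE B (Python) =====
-- # Inverted keyword->priority index: gather ALL matching keywords, then pick the
-- # label of the minimum priority hit (first match in a priority ladder = minimum
-- # fired priority, so this is exact).
-- EMOTION_LABELS = ['excited', 'concerned', 'frustrated', 'contemplative', 'defeated']
-- EMOTION_INDEX = {  # keyword -> priority of its emotion
--     '!': 0, 'amazing': 0, 'incredible': 0, 'breakthrough': 0,
--     'worried': 1, 'concern': 1, 'afraid': 1, 'anxious': 1,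
--     'frustrated': 2, 'damn': 2, 'hell': 2, 'annoying': 2,
--     'wonder': 3, 'think': 3, 'perhaps': 3, 'maybe': 3,
--     'sad': 4, 'lost': 4, 'defeat': 4, 'fail': 4,
-- }
-- SPEAKER_LABELS = ['dr_sarah_martinez', 'david_chen', 'dr_raj_patel', 'artemis_ai',
--                   'marcus_rivera', 'sarah_kim', 'jennifer_wu']
-- SPEAKER_INDEX = {  # keyword -> (priority, needs a '"' in the raw paragraph)
--     'sarah martinez': (0, False), 'dr. martinez': (0, False),
--     'david chen': (1, True),
--     'raj patel': (2, False), 'dr. patel': (2, False),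
--     'artemis': (3, True),
--     'marcus rivera': (4, False), 'marcus said': (4, False),
--     'sarah kim': (5, False),
--     'jennifer wu': (6, False), 'jennifer said': (6, False),
-- }
--
-- def _best(hits, labels, default):
--     return labels[min(hits)] if hits else default
--
-- def _emotion(para):
--     low = para.lower()
--     return _best([pri for kw, pri in EMOTION_INDEX.items() if kw in low],
--                  EMOTION_LABELS, 'neutral')
--
-- def _speaker(para):
--     low = para.lower()
--     return _best([pri for kw, (pri, quoted) in SPEAKER_INDEX.items()
--                   if kw in low and (not quoted or '"' in para)],
--                  SPEAKER_LABELS, 'narrator')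
--
-- def detect_dialogue_and_speaker(text):
--     paras = [p.strip() for p in text.split('\n\n')]
--     return [(_speaker(p), p, _emotion(p)) for p in paras if p]
-- ===== Notes on version B (the rewrite author's own statement) =====
-- stated objective: alternative
-- what changed: The two if/elif ladders are replaced by an inverted keyword->priority index: each paragraph collects ALL matching keywords' priorities (no per-rule scan, no short-circuit), takes the minimum, and indexes a label list (first match in a priority ladder = minimum fired priority); the outer accumulator loop becomes a strip/filter/map pipeline.
import Mathlib
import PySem

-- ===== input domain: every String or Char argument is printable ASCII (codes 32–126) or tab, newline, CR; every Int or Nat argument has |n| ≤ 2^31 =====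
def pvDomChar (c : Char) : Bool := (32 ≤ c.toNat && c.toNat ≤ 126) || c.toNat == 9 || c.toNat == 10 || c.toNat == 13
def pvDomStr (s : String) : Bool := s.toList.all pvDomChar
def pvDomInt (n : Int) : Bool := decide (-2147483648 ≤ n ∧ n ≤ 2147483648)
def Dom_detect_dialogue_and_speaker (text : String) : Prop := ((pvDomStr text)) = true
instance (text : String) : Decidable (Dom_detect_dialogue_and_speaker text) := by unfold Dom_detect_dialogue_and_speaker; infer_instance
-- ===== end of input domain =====

-- B replaces the two if/elif ladders by an inverted keyword->priority index
-- (collect all hit priorities, take the minimum, index a label list) and the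
-- outer accumulator loop by a strip/filter/map pipeline; objective: alternative.


-- ===== PORT A =====
def aDetectEmotion (text : String) (_speaker : String) : String :=
  let tl := PySem.Str.lower text
  if ["!", "amazing", "incredible", "breakthrough"].any (fun w => PySem.Str.isIn w tl) then "excited"
  else if ["worried", "concern", "afraid", "anxious"].any (fun w => PySem.Str.isIn w tl) then "concerned"
  else if ["frustrated", "damn", "hell", "annoying"].any (fun w => PySem.Str.isIn w tl) then "frustrated"
  else if ["wonder", "think", "perhaps", "maybe"].any (fun w => PySem.Str.isIn w tl) then "contemplative"
  else if ["sad", "lost", "defeat", "fail"].any (fun w => PySem.Str.isIn w tl) then "defeated"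
  else "neutral"

def aIdentifySpeaker (text : String) : String :=
  let tl := PySem.Str.lower text
  if PySem.Str.isIn "sarah martinez" tl || PySem.Str.isIn "dr. martinez" tl then "dr_sarah_martinez"
  else if PySem.Str.isIn "david chen" tl && PySem.Str.isIn "\"" text then "david_chen"
  else if PySem.Str.isIn "raj patel" tl || PySem.Str.isIn "dr. patel" tl then "dr_raj_patel"
  else if PySem.Str.isIn "artemis" tl && PySem.Str.isIn "\"" text then "artemis_ai"
  else if PySem.Str.isIn "marcus rivera" tl || PySem.Str.isIn "marcus said" tl then "marcus_rivera"
  else if PySem.Str.isIn "sarah kim" tl then "sarah_kim"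
  else if PySem.Str.isIn "jennifer wu" tl || PySem.Str.isIn "jennifer said" tl then "jennifer_wu"
  else "narrator"

def detect_dialogue_and_speaker (text : String) : List (String × String × String) :=
  ((PySem.Str.split? text "\n\n").getD []).foldl
    (fun segments para =>
      let p := PySem.Str.strip para
      if p = "" then segments
      else
        let speaker := aIdentifySpeaker p
        let emotion := aDetectEmotion p speaker
        segments ++ [(speaker, p, emotion)])
    []

-- ===== PORT B =====
def bEmotionLabels : List String :=
  ["excited", "concerned", "frustrated", "contemplative", "defeated"]

-- keyword -> priority of its emotion (Python dict, insertion order)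
def bEmotionIndex : List (String × Nat) :=
  [("!", 0), ("amazing", 0), ("incredible", 0), ("breakthrough", 0),
   ("worried", 1), ("concern", 1), ("afraid", 1), ("anxious", 1),
   ("frustrated", 2), ("damn", 2), ("hell", 2), ("annoying", 2),
   ("wonder", 3), ("think", 3), ("perhaps", 3), ("maybe", 3),
   ("sad", 4), ("lost", 4), ("defeat", 4), ("fail", 4)]

def bSpeakerLabels : List String :=
  ["dr_sarah_martinez", "david_chen", "dr_raj_patel", "artemis_ai",
   "marcus_rivera", "sarah_kim", "jennifer_wu"]

-- keyword -> (priority, needs a '"' in the raw paragraph)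
def bSpeakerIndex : List (String × Nat × Bool) :=
  [("sarah martinez", 0, false), ("dr. martinez", 0, false),
   ("david chen", 1, true),
   ("raj patel", 2, false), ("dr. patel", 2, false),
   ("artemis", 3, true),
   ("marcus rivera", 4, false), ("marcus said", 4, false),
   ("sarah kim", 5, false),
   ("jennifer wu", 6, false), ("jennifer said", 6, false)]

def bBest (hits : List Nat) (labels : List String) (default : String) : String :=
  match hits.min? with
  | some i => labels.getD i default
  | none => default

def bEmotion (para : String) : String :=
  let low := PySem.Str.lower para
  bBest ((bEmotionIndex.filter (fun kp => PySem.Str.isIn kp.1 low)).map Prod.snd)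
    bEmotionLabels "neutral"

def bSpeaker (para : String) : String :=
  let low := PySem.Str.lower para
  bBest ((bSpeakerIndex.filter
            (fun e => PySem.Str.isIn e.1 low && (!e.2.2 || PySem.Str.isIn "\"" para))).map
          (fun e => e.2.1))
    bSpeakerLabels "narrator"

def detect_dialogue_and_speaker_alt (text : String) : List (String × String × String) :=
  ((((PySem.Str.split? text "\n\n").getD []).map PySem.Str.strip).filter (fun p => p ≠ "")).map
    (fun p => (bSpeaker p, p, bEmotion p))

-- ===== PRECONDITION & SPEC =====
def Spec_detect_dialogue_and_speaker (text : String) (out : List (String × String × String)) : Prop := out = detect_dialogue_and_speaker_alt text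
instance (text : String) (out : List (String × String × String)) : Decidable (Spec_detect_dialogue_and_speaker text out) := by unfold Spec_detect_dialogue_and_speaker; infer_instance

-- ===== CLAIM (what is proved, stated in full; the proofs are below) =====
def Claim_equal_detect_dialogue_and_speaker : Prop := ∀ (text : String), Dom_detect_dialogue_and_speaker text → Spec_detect_dialogue_and_speaker text (detect_dialogue_and_speaker text)

-- ===== LEMMAS AND PROOFS =====
-- keyword groups of A's ladders, and a generic "min fired priority = first fired rule" lemma
def pvFlat {α : Type} (k : Nat) : List (List α) → List (α × Nat)
  | [] => []
  | g :: G => g.map (fun a => (a, k)) ++ pvFlat (k + 1) G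

def pvEmoGroups : List (List String) :=
  [["!", "amazing", "incredible", "breakthrough"],
   ["worried", "concern", "afraid", "anxious"],
   ["frustrated", "damn", "hell", "annoying"],
   ["wonder", "think", "perhaps", "maybe"],
   ["sad", "lost", "defeat", "fail"]]

def pvSpkGroups : List (List (String × Bool)) :=
  [[("sarah martinez", false), ("dr. martinez", false)],
   [("david chen", true)],
   [("raj patel", false), ("dr. patel", false)],
   [("artemis", true)],
   [("marcus rivera", false), ("marcus said", false)],
   [("sarah kim", false)],
   [("jennifer wu", false), ("jennifer said", false)]]

theorem pvEmoIndex_eq : bEmotionIndex = pvFlat 0 pvEmoGroups := by decide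

theorem pvSpkIndex_eq :
    bSpeakerIndex = (pvFlat 0 pvSpkGroups).map (fun p => (p.1.1, p.2, p.1.2)) := by decide

theorem pvFilt_map_const {α : Type} (g : List α) (pred : α → Bool) (k : Nat) :
    ((g.map (fun a => (a, k))).filter (fun p => pred p.1)).map Prod.snd
      = List.replicate (g.filter pred).length k := by
  induction g with
  | nil => simp
  | cons a g ih =>
    by_cases h : pred a = true <;> simp [h, ih, List.replicate_succ]

theorem pvFlat_snd_ge {α : Type} (G : List (List α)) (k : Nat) :
    ∀ p ∈ pvFlat k G, k ≤ p.2 := by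
  induction G generalizing k with
  | nil => simp [pvFlat]
  | cons g G ih =>
    intro p hp
    simp only [pvFlat, List.mem_append, List.mem_map] at hp
    rcases hp with ⟨a, _, rfl⟩ | hp
    · exact le_refl _
    · exact Nat.le_of_succ_le (ih (k + 1) p hp)

theorem pvMin_flat {α : Type} (G : List (List α)) (pred : α → Bool) (k : Nat) :
    (((pvFlat k G).filter (fun p => pred p.1)).map Prod.snd).min?
      = (G.findIdx? (fun g => g.any pred)).map (fun i => k + i) := by
  induction G generalizing k with
  | nil => simp [pvFlat]
  | cons g G ih =>
    rw [pvFlat, List.filter_append, List.map_append, pvFilt_map_const]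
    rcases h : (g.filter pred).length with _ | m
    · have hany : g.any pred = false := by
        rcases hg : g.any pred with _ | _
        · rfl
        · exfalso
          rcases List.any_eq_true.mp hg with ⟨a, ha, hpa⟩
          have : a ∈ g.filter pred := List.mem_filter.mpr ⟨ha, hpa⟩
          rcases List.length_eq_zero_iff.mp h with hnil
          simp [hnil] at this
      rw [List.replicate_zero, List.nil_append, ih, List.findIdx?_cons, hany]
      simp only [Bool.false_eq_true, if_false]
      cases G.findIdx? (fun g => g.any pred)
      · rfl
      · simp; omega
    · have hany : g.any pred = true := by
        have : (g.filter pred) ≠ [] := by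
          intro hnil; rw [hnil] at h; simp at h
        rcases List.exists_mem_of_ne_nil _ this with ⟨a, ha⟩
        rcases List.mem_filter.mp ha with ⟨hmem, hpa⟩
        exact List.any_eq_true.mpr ⟨a, hmem, hpa⟩
      rw [List.findIdx?_cons, hany, if_pos rfl]
      have : (List.replicate (m + 1) k
          ++ (((pvFlat (k + 1) G).filter (fun p => pred p.1)).map Prod.snd)).min? = some k := by
        rw [List.min?_eq_some_iff]
        constructor
        · exact List.mem_append_left _ (List.mem_replicate.mpr ⟨Nat.succ_ne_zero m, rfl⟩)
        · intro b hb
          rcases List.mem_append.mp hb with hb | hb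
          · exact le_of_eq (List.eq_of_mem_replicate hb).symm
          · rcases List.mem_map.mp hb with ⟨p, hp, rfl⟩
            have := pvFlat_snd_ge G (k + 1) p (List.mem_filter.mp hp).1
            omega
      rw [this]; simp


theorem bEmotion_eq_find (p : String) :
    bEmotion p = match pvEmoGroups.findIdx? (fun g => g.any (fun w => PySem.Str.isIn w (PySem.Str.lower p))) with
      | some i => bEmotionLabels.getD i "neutral"
      | none => "neutral" := by
  unfold bEmotion bBest
  simp only [pvEmoIndex_eq]
  rw [pvMin_flat pvEmoGroups (fun w => PySem.Str.isIn w (PySem.Str.lower p)) 0]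
  cases pvEmoGroups.findIdx? (fun g => g.any (fun w => PySem.Str.isIn w (PySem.Str.lower p))) <;> simp

theorem emotion_eq (p s : String) : aDetectEmotion p s = bEmotion p := by
  rw [bEmotion_eq_find]
  unfold aDetectEmotion
  simp only [pvEmoGroups, List.findIdx?_cons, List.findIdx?_nil]
  split_ifs <;> rfl

theorem bSpeaker_eq_find (p : String) :
    bSpeaker p = match pvSpkGroups.findIdx? (fun g => g.any (fun a =>
        PySem.Str.isIn a.1 (PySem.Str.lower p) && (!a.2 || PySem.Str.isIn "\"" p))) with
      | some i => bSpeakerLabels.getD i "narrator"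
      | none => "narrator" := by
  unfold bSpeaker bBest
  simp only [pvSpkIndex_eq, List.filter_map, List.map_map, Function.comp_def]
  rw [pvMin_flat pvSpkGroups (fun a : String × Bool =>
        PySem.Str.isIn a.1 (PySem.Str.lower p) && (!a.2 || PySem.Str.isIn "\"" p)) 0]
  cases pvSpkGroups.findIdx? (fun g => g.any (fun a =>
      PySem.Str.isIn a.1 (PySem.Str.lower p) && (!a.2 || PySem.Str.isIn "\"" p))) <;> simp

theorem speaker_eq (p : String) : aIdentifySpeaker p = bSpeaker p := by
  rw [bSpeaker_eq_find]
  unfold aIdentifySpeaker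
  simp only [pvSpkGroups, List.findIdx?_cons, List.findIdx?_nil, List.any_cons, List.any_nil,
    Bool.not_true, Bool.not_false, Bool.false_or, Bool.true_or, Bool.and_true, Bool.or_false]
  split_ifs <;> rfl

-- A's accumulator loop, run on any paragraph list, equals B's filter/map pipeline.
theorem pipeline_eq (xs : List String) (init : List (String × String × String)) :
    xs.foldl
      (fun segments para =>
        let p := PySem.Str.strip para
        if p = "" then segments
        else
          let speaker := aIdentifySpeaker p
          let emotion := aDetectEmotion p speaker
          segments ++ [(speaker, p, emotion)])
      init
    = init ++ ((xs.map PySem.Str.strip).filter (fun p => p ≠ "")).map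
        (fun p => (bSpeaker p, p, bEmotion p)) := by
  induction xs generalizing init with
  | nil => simp
  | cons x xs ih =>
    rw [List.foldl_cons, ih]
    by_cases h : PySem.Str.strip x = "" <;>
      simp [h, speaker_eq, emotion_eq]

-- ===== VERDICT (by name: the statement is the Claim_ definition above) =====
theorem detect_dialogue_and_speaker_spec : Claim_equal_detect_dialogue_and_speaker := by
  intro text _
  unfold Spec_detect_dialogue_and_speaker detect_dialogue_and_speaker detect_dialogue_and_speaker_alt
  rw [pipeline_eq, List.nil_append]
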